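-- pv_equiv track=rewrite | github.com/martinosorb/rbm_utils | stutils.py | detect_avalanches
-- ===== SOURCE A (Python) =====
-- def detect_avalanches(activity):
--     a_sizes = []
--     a_durations = []
--     curr_a_duration, curr_a_size = 0, 0
--
--     for a in activity:
--         if a == 0:
--             if curr_a_duration > 0:
--                 a_sizes.append(curr_a_size)
--                 a_durations.append(curr_a_duration)
--             curr_a_size = 0
--             curr_a_duration = 0
--             continue
--         curr_a_duration += 1
--         curr_a_size += a
--     return a_sizes, a_durations
-- ===== SOURCE B (Python) =====
-- from itertools import groupby
--
--
-- def detect_avalanches(activity):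
--     acts = list(activity)
--     a_sizes, a_durations = [], []
--     for is_zero, run in groupby(acts, key=lambda a: a == 0):
--         if not is_zero:
--             run = list(run)
--             a_sizes.append(sum(run))
--             a_durations.append(len(run))
--     if acts and acts[-1] != 0:
--         # the final run is an unterminated avalanche; the reference only
--         # records runs that are followed by a zero
--         a_sizes.pop()
--         a_durations.pop()
--     return a_sizes, a_durations
-- ===== Notes on version B (the rewrite author's own statement) =====
-- stated objective: idiomatic
-- what changed: Replaces A's manual four-variable state machine with an itertools.groupby decomposition into zero/non-zero runs, summing and measuring each non-zero run and dropping a trailing unterminated run.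
import Mathlib
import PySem

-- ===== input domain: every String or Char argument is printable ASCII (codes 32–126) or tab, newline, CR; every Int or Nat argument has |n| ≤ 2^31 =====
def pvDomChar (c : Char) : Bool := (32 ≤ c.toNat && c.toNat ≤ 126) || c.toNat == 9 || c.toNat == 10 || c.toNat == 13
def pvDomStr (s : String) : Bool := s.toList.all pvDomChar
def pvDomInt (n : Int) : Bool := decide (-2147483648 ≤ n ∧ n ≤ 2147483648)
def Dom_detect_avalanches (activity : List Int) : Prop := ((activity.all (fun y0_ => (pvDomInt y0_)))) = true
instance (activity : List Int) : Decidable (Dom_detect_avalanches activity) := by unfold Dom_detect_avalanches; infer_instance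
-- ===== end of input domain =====

-- B replaces A's manual state machine by an itertools.groupby decomposition into zero/non-zero
-- runs (objective: idiomatic); A and B agree on all inputs.

-- ===== PORT A =====
-- the for-loop of A with its four state variables
def daGo (xs : List Int) (a_sizes a_durations : List Int) (curr_a_size curr_a_duration : Int) :
    List Int × List Int :=
  match xs with
  | [] => (a_sizes, a_durations)
  | a :: rest =>
    if a = 0 then
      if curr_a_duration > 0 then
        daGo rest (a_sizes ++ [curr_a_size]) (a_durations ++ [curr_a_duration]) 0 0
      else
        daGo rest a_sizes a_durations 0 0
    else
      daGo rest a_sizes a_durations (curr_a_size + a) (curr_a_duration + 1)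

def detect_avalanches (activity : List Int) : List Int × List Int :=
  daGo activity [] [] 0 0

-- ===== PORT B =====
-- itertools.groupby(acts, key=lambda a: a == 0), streaming left to right:
-- `k` is the current group's key, `cur` the current group's elements.
def runsGo (xs : List Int) (k : Bool) (cur : List Int) : List (Bool × List Int) :=
  match xs with
  | [] => [(k, cur)]
  | a :: rest =>
    if decide (a = 0) = k then runsGo rest k (cur ++ [a])
    else (k, cur) :: runsGo rest (decide (a = 0)) [a]

def runsBy (xs : List Int) : List (Bool × List Int) :=
  match xs with
  | [] => []
  | a :: rest => runsGo rest (decide (a = 0)) [a]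

def detect_avalanches_alt (activity : List Int) : List Int × List Int :=
  let runs := (runsBy activity).filter (fun g => !g.1)
  let a_sizes := runs.map (fun g => g.2.sum)
  let a_durations := runs.map (fun g => (g.2.length : Int))
  match activity.getLast? with
  | some x => if x ≠ 0 then (a_sizes.dropLast, a_durations.dropLast) else (a_sizes, a_durations)
  | none => (a_sizes, a_durations)

-- ===== PRECONDITION & SPEC =====
def Spec_detect_avalanches (activity : List Int) (out : List Int × List Int) : Prop := out = detect_avalanches_alt activity
instance (activity : List Int) (out : List Int × List Int) : Decidable (Spec_detect_avalanches activity out) := by unfold Spec_detect_avalanches; infer_instance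

-- ===== CLAIM (what is proved, stated in full; the proofs are below) =====
def Claim_equal_detect_avalanches : Prop := ∀ (activity : List Int), Dom_detect_avalanches activity → Spec_detect_avalanches activity (detect_avalanches activity)

-- ===== LEMMAS AND PROOFS =====

-- reference recursion: avalanches completed by a zero, with pending (size, duration) state
def refA (xs : List Int) (cs cd : Int) : List Int × List Int :=
  match xs with
  | [] => ([], [])
  | a :: rest =>
    if a = 0 then
      if cd > 0 then (cs :: (refA rest 0 0).1, cd :: (refA rest 0 0).2)
      else refA rest 0 0
    else refA rest (cs + a) (cd + 1)

mutual
-- all runs including a trailing unterminated one: refG = inside a non-zero run with pending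
-- (cs, cd), refH = at a run boundary / inside a zero run
def refG (xs : List Int) (cs cd : Int) : List Int × List Int :=
  match xs with
  | [] => ([cs], [cd])
  | a :: rest =>
    if a = 0 then (cs :: (refH rest).1, cd :: (refH rest).2)
    else refG rest (cs + a) (cd + 1)

def refH (xs : List Int) : List Int × List Int :=
  match xs with
  | [] => ([], [])
  | a :: rest => if a = 0 then refH rest else refG rest a 1
end

-- B's filter/map pipeline as a function of the group list
def pfun (gs : List (Bool × List Int)) : List Int × List Int :=
  ((gs.filter (fun g => !g.1)).map (fun g => g.2.sum),
   (gs.filter (fun g => !g.1)).map (fun g => (g.2.length : Int)))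

theorem pfun_cons_false (g : List Int) (gs : List (Bool × List Int)) :
    pfun ((false, g) :: gs) = (g.sum :: (pfun gs).1, (g.length : Int) :: (pfun gs).2) := by
  simp [pfun]

theorem pfun_cons_true (g : List Int) (gs : List (Bool × List Int)) :
    pfun ((true, g) :: gs) = pfun gs := by
  simp [pfun]

theorem daGo_eq (xs : List Int) : ∀ (S D : List Int) (cs cd : Int),
    daGo xs S D cs cd = (S ++ (refA xs cs cd).1, D ++ (refA xs cs cd).2) := by
  induction xs with
  | nil => intro S D cs cd; simp [daGo, refA]
  | cons a rest ih =>
    intro S D cs cd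
    by_cases ha : a = 0
    · by_cases hd : cd > 0
      · simp [daGo, refA, ha, hd, ih]
      · simp [daGo, refA, ha, hd, ih]
    · simp [daGo, refA, ha, ih]

theorem runs_spec (xs : List Int) :
    (∀ cur : List Int, pfun (runsGo xs false cur) = refG xs cur.sum (cur.length : Int)) ∧
    (∀ cur : List Int, pfun (runsGo xs true cur) = refH xs) := by
  induction xs with
  | nil =>
    constructor <;> intro cur <;> simp [runsGo, pfun, refG, refH]
  | cons a rest ih =>
    constructor <;> intro cur <;> by_cases ha : a = 0
    · -- false state, a = 0: close the run
      rw [show runsGo (a :: rest) false cur = (false, cur) :: runsGo rest true [a] by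
            simp [runsGo, ha]]
      rw [pfun_cons_false, ih.2 [a], ha]
      simp [refG]
    · -- false state, a ≠ 0: extend the run
      rw [show runsGo (a :: rest) false cur = runsGo rest false (cur ++ [a]) by
            simp [runsGo, ha]]
      rw [ih.1 (cur ++ [a])]
      simp [refG, ha]
    · -- true state, a = 0: extend the zero run
      rw [show runsGo (a :: rest) true cur = runsGo rest true (cur ++ [a]) by
            simp [runsGo, ha]]
      rw [ih.2 (cur ++ [a])]
      simp [refH, ha]
    · -- true state, a ≠ 0: start a non-zero run
      rw [show runsGo (a :: rest) true cur = (true, cur) :: runsGo rest false [a] by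
            simp [runsGo, ha]]
      rw [pfun_cons_true, ih.1 [a]]
      simp [refH, ha]

-- one-step unfolding equations
theorem refG_cons_zero (rest : List Int) (cs cd : Int) :
    refG (0 :: rest) cs cd = (cs :: (refH rest).1, cd :: (refH rest).2) := by simp [refG]

theorem refG_cons_ne {a : Int} (ha : a ≠ 0) (rest : List Int) (cs cd : Int) :
    refG (a :: rest) cs cd = refG rest (cs + a) (cd + 1) := by simp [refG, ha]

theorem refH_cons_zero (rest : List Int) : refH (0 :: rest) = refH rest := by simp [refH]

theorem refH_cons_ne {a : Int} (ha : a ≠ 0) (rest : List Int) :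
    refH (a :: rest) = refG rest a 1 := by simp [refH, ha]

theorem refA_cons_zero_pos (rest : List Int) (cs cd : Int) (hcd : cd > 0) :
    refA (0 :: rest) cs cd = (cs :: (refA rest 0 0).1, cd :: (refA rest 0 0).2) := by
  simp [refA, hcd]

theorem refA_cons_zero_np (rest : List Int) (cs : Int) :
    refA (0 :: rest) cs 0 = refA rest 0 0 := by simp [refA]

theorem refA_cons_ne {a : Int} (ha : a ≠ 0) (rest : List Int) (cs cd : Int) :
    refA (a :: rest) cs cd = refA rest (cs + a) (cd + 1) := by simp [refA, ha]

-- refG/refH versus refA: they agree except that, when the sequence ends inside a non-zero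
-- run, refG/refH carry one extra trailing pair
theorem ref_key (xs : List Int) :
    (∀ cs cd : Int, cd > 0 →
      ((xs.getLast?.getD 1 ≠ 0) →
        ∃ s d, refG xs cs cd = ((refA xs cs cd).1 ++ [s], (refA xs cs cd).2 ++ [d])) ∧
      ((xs.getLast?.getD 1 = 0) → refG xs cs cd = refA xs cs cd)) ∧
    (((xs.getLast?.getD 0 ≠ 0) →
        ∃ s d, refH xs = ((refA xs 0 0).1 ++ [s], (refA xs 0 0).2 ++ [d])) ∧
      ((xs.getLast?.getD 0 = 0) → refH xs = refA xs 0 0)) := by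
  induction xs with
  | nil =>
    refine ⟨fun cs cd hcd => ⟨fun _ => ⟨cs, cd, by simp [refG, refA]⟩, fun h => by simp at h⟩,
            fun h => by simp at h, fun _ => by simp [refH, refA]⟩
  | cons a rest ih =>
    refine ⟨fun cs cd hcd => ?_, ?_, ?_⟩
    · by_cases ha : a = 0
      · subst ha
        cases rest with
        | nil =>
          refine ⟨fun h => absurd (show ((0:Int)::[]).getLast?.getD 1 = 0 by simp) h, fun _ => ?_⟩
          rw [refG_cons_zero, refA_cons_zero_pos _ _ _ hcd]
          simp [refH, refA]
        | cons b r =>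
          constructor
          · intro h
            rw [List.getLast?_cons_cons] at h
            obtain ⟨s, d, hs⟩ := ih.2.1 (by simpa using h)
            refine ⟨s, d, ?_⟩
            rw [refG_cons_zero, refA_cons_zero_pos _ _ _ hcd, hs]
            simp
          · intro h
            rw [List.getLast?_cons_cons] at h
            have h2 := ih.2.2 (by simpa using h)
            rw [refG_cons_zero, refA_cons_zero_pos _ _ _ hcd, h2]
      · cases rest with
        | nil =>
          refine ⟨fun _ => ⟨cs + a, cd + 1, ?_⟩, fun h => absurd (by simpa using h) ha⟩
          rw [refG_cons_ne ha, refA_cons_ne ha]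
          simp [refG, refA]
        | cons b r =>
          have h1 := (ih.1 (cs + a) (cd + 1) (by omega))
          constructor
          · intro h
            rw [List.getLast?_cons_cons] at h
            obtain ⟨s, d, hs⟩ := h1.1 h
            refine ⟨s, d, ?_⟩
            rw [refG_cons_ne ha, refA_cons_ne ha, hs]
          · intro h
            rw [List.getLast?_cons_cons] at h
            rw [refG_cons_ne ha, refA_cons_ne ha, h1.2 h]
    · -- H part, ≠ 0
      intro h
      by_cases ha : a = 0
      · subst ha
        cases rest with
        | nil => simp at h
        | cons b r =>
          rw [List.getLast?_cons_cons] at h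
          obtain ⟨s, d, hs⟩ := ih.2.1 h
          refine ⟨s, d, ?_⟩
          rw [refH_cons_zero, refA_cons_zero_np, hs]
      · cases rest with
        | nil =>
          refine ⟨a, 1, ?_⟩
          rw [refH_cons_ne ha, refA_cons_ne ha]
          simp [refG, refA]
        | cons b r =>
          rw [List.getLast?_cons_cons] at h
          obtain ⟨s, d, hs⟩ := (ih.1 a 1 (by omega)).1 (by simpa using h)
          refine ⟨s, d, ?_⟩
          rw [refH_cons_ne ha, refA_cons_ne ha]
          simpa using hs
    · -- H part, = 0
      intro h
      by_cases ha : a = 0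
      · subst ha
        cases rest with
        | nil => simp [refH, refA]
        | cons b r =>
          rw [List.getLast?_cons_cons] at h
          rw [refH_cons_zero, refA_cons_zero_np, ih.2.2 h]
      · cases rest with
        | nil => exact absurd (by simpa using h) ha
        | cons b r =>
          rw [List.getLast?_cons_cons] at h
          rw [refH_cons_ne ha, refA_cons_ne ha]
          simpa using (ih.1 a 1 (by omega)).2 (by simpa using h)

theorem alt_pre (act : List Int) : pfun (runsBy act) = refH act := by
  cases act with
  | nil => simp [runsBy, pfun, refH]
  | cons a rest =>
    by_cases ha : a = 0
    · rw [show runsBy (a :: rest) = runsGo rest true [a] by simp [runsBy, ha]]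
      rw [(runs_spec rest).2 [a]]
      simp [refH, ha]
    · rw [show runsBy (a :: rest) = runsGo rest false [a] by simp [runsBy, ha]]
      rw [(runs_spec rest).1 [a]]
      simp [refH, ha]

theorem detect_avalanches_eq_refA (act : List Int) : detect_avalanches act = refA act 0 0 := by
  rw [detect_avalanches, daGo_eq]
  simp

theorem main_eq (act : List Int) : detect_avalanches act = detect_avalanches_alt act := by
  have hp1 := congrArg Prod.fst (alt_pre act)
  have hp2 := congrArg Prod.snd (alt_pre act)
  simp [pfun] at hp1 hp2
  rw [detect_avalanches_eq_refA]
  cases hlast : act.getLast? with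
  | none =>
    have h0 := (ref_key act).2.2 (by simp [hlast])
    simp [detect_avalanches_alt, hlast, hp1, hp2, h0]
  | some x =>
    by_cases hx : x = 0
    · have h0 := (ref_key act).2.2 (by simp [hlast, hx])
      simp [detect_avalanches_alt, hlast, hx, hp1, hp2, h0]
    · obtain ⟨s, d, hs⟩ := (ref_key act).2.1 (by simp [hlast, hx])
      have hs1 : (refH act).1 = (refA act 0 0).1 ++ [s] := by rw [hs]
      have hs2 : (refH act).2 = (refA act 0 0).2 ++ [d] := by rw [hs]
      simp [detect_avalanches_alt, hlast, hx, hp1, hp2, hs1, hs2]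

-- ===== VERDICT (by name: the statement is the Claim_ definition above) =====
theorem detect_avalanches_spec : Claim_equal_detect_avalanches := by
  intro act _
  unfold Spec_detect_avalanches
  exact main_eq act
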